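-- pv_equiv track=rewrite | github.com/satyamtiwari1004/GovermentID-OCR | ocr_app/views.py | clean_mrz_line_by_standard
-- ===== SOURCE A (Python) =====
-- def correct_mrz_character(c, position, line_number):
--     # Allowed character sets by field
--     if line_number == 1:
--         if position in range(0, 2):  # P<
--             return 'P' if c not in ['P', '<'] else c
--         elif position in range(2, 5):  # A-Z (Issuing country)
--             return c if c.isalpha() else '<'
--         else:  # Names section
--             return c if c.isalpha() or c == '<' else '<'
--     elif line_number == 2:
--         if position in list(range(0, 9)) + list(range(10, 13)) + list(range(28, 43)):
--             # Passport no., Nationality, Optional data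
--             return c if c.isalnum() or c == '<' else '<'
--         elif position in [9, 19, 27, 42]:  # Check digits
--             return c if c.isdigit() or c == '<' else '<'
--         elif position in range(13, 19):  # DOB YYMMDD
--             return c if c.isdigit() else '<'
--         elif position == 20:  # Sex
--             return c if c in ['M', 'F', '<'] else '<'
--         elif position in range(21, 27):  # Expiry date
--             return c if c.isdigit() else '<'
--         else:
--             return c if c.isalnum() or c == '<' else '<'
--     else:
--         return c
--
-- def clean_mrz_line_by_standard(line, line_number):
--     line = line.strip().upper().replace(' ', '<').replace('?', '<').replace('_', '<')
--
--     # Replace common misread characters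
--     ocr_fixes = {
--         'O': '0', 'Q': '0', 'D': '0',  # Digits
--         'I': '1', 'L': '1', '|': '1',
--         'Z': '2', 'S': '5', 'B': '8',
--     }
--
--     line = ''.join(ocr_fixes.get(c, c) for c in line)
--
--     # Ensure correct length (MRZ line is 44 chars for passports)
--     line = line.ljust(44, '<')[:44]
--
--     # Apply field-based correction
--     corrected = ''.join(correct_mrz_character(c, i, line_number) for i, c in enumerate(line))
--     return corrected
-- ===== SOURCE B (Python) =====
-- _TABLE = str.maketrans({' ': '<', '?': '<', '_': '<',
--                         'O': '0', 'Q': '0', 'D': '0',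
--                         'I': '1', 'L': '1', '|': '1',
--                         'Z': '2', 'S': '5', 'B': '8'})
--
--
-- def _field(seg, fill, ok):
--     return ''.join(c if ok(c) else fill for c in seg)
--
--
-- # MRZ layout as contiguous fields (start, stop, fill, allowed-predicate); position 42
-- # belongs to A's optional-data range (its branch precedence) and 43 hits the alnum
-- # catch-all, so 28..44 is a single alnum-or-< field.
-- _FIELDS = {
--     1: [(0, 2, 'P', lambda c: c in 'P<'),                    # document type
--         (2, 5, '<', str.isalpha),                            # issuing country
--         (5, 44, '<', lambda c: c.isalpha() or c == '<')],    # names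
--     2: [(0, 9, '<', lambda c: c.isalnum() or c == '<'),      # passport number
--         (9, 10, '<', lambda c: c.isdigit() or c == '<'),     # check digit
--         (10, 13, '<', lambda c: c.isalnum() or c == '<'),    # nationality
--         (13, 19, '<', str.isdigit),                          # date of birth
--         (19, 20, '<', lambda c: c.isdigit() or c == '<'),    # check digit
--         (20, 21, '<', lambda c: c in 'MF<'),                 # sex
--         (21, 27, '<', str.isdigit),                          # expiry date
--         (27, 28, '<', lambda c: c.isdigit() or c == '<'),    # check digit
--         (28, 44, '<', lambda c: c.isalnum() or c == '<')],   # optional data + final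
-- }
--
--
-- def clean_mrz_line_by_standard(line, line_number):
--     s = line.strip().upper().translate(_TABLE)
--     s = (s + '<' * 44)[:44]
--     fields = _FIELDS.get(line_number)
--     if fields is None:
--         return s
--     return ''.join(_field(s[a:b], fill, ok) for a, b, fill, ok in fields)
-- ===== Notes on version B (the rewrite author's own statement) =====
-- stated objective: simpler
-- what changed: B restructures the computation field-wise: it fuses the three replace() passes and the OCR-fix pass into one str.translate, then slices the 44-char line into the MRZ's contiguous fields (document type, country, names / passport no., check digits, dates, sex, optional data) and cleans each field substring as a whole with its allowed-set predicate, concatenating the cleaned fields, instead of A's per-character position-range if/elif cascade (which rebuilds the range lists for every character).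
import Mathlib
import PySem

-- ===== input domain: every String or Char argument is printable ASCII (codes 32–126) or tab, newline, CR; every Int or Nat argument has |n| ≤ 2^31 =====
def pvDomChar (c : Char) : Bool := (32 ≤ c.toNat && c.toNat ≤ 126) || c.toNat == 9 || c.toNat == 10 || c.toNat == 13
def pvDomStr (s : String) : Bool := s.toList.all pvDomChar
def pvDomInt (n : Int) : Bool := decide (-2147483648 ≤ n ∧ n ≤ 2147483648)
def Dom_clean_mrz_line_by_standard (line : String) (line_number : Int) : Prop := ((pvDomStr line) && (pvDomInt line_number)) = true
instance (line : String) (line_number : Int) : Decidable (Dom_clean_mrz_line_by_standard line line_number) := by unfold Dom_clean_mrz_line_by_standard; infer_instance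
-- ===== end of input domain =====

-- B fuses A's three replace() passes + OCR-fix pass into one translate table and cleans the
-- 44-char line field-by-field (contiguous slices with per-field allowed sets) instead of A's
-- per-character position-range cascade (objective: simpler decomposition; same return value).


-- ===== PORT A =====
def correct_mrz_character (c : Char) (position : Int) (line_number : Int) : Char :=
  if line_number == 1 then
    if position ∈ PySem.List.pyRange 0 2 1 then          -- P<
      if ¬(c ∈ (['P', '<'] : List Char)) then 'P' else c
    else if position ∈ PySem.List.pyRange 2 5 1 then     -- A-Z (Issuing country)
      if PySem.Chars.isalpha c then c else '<'
    else                                                 -- Names section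
      if PySem.Chars.isalpha c || c == '<' then c else '<'
  else if line_number == 2 then
    if position ∈ (PySem.List.pyRange 0 9 1 ++ PySem.List.pyRange 10 13 1 ++ PySem.List.pyRange 28 43 1) then
      -- Passport no., Nationality, Optional data
      if PySem.Chars.isalnum c || c == '<' then c else '<'
    else if position ∈ ([9, 19, 27, 42] : List Int) then -- Check digits
      if PySem.Chars.isdigit c || c == '<' then c else '<'
    else if position ∈ PySem.List.pyRange 13 19 1 then   -- DOB YYMMDD
      if PySem.Chars.isdigit c then c else '<'
    else if position == 20 then                          -- Sex
      if c ∈ (['M', 'F', '<'] : List Char) then c else '<'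
    else if position ∈ PySem.List.pyRange 21 27 1 then   -- Expiry date
      if PySem.Chars.isdigit c then c else '<'
    else
      if PySem.Chars.isalnum c || c == '<' then c else '<'
  else c

def clean_mrz_line_by_standard (line : String) (line_number : Int) : String :=
  let l0 := PySem.Chars.replace (PySem.Chars.replace (PySem.Chars.replace
              (PySem.Chars.upper (PySem.Chars.strip line.toList)) [' '] ['<']) ['?'] ['<']) ['_'] ['<']
  let ocr_fixes : PySem.Dict Char Char :=
    ⟨[('O', '0'), ('Q', '0'), ('D', '0'),
      ('I', '1'), ('L', '1'), ('|', '1'),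
      ('Z', '2'), ('S', '5'), ('B', '8')]⟩
  let l1 := l0.map (fun c => ocr_fixes.getD c c)
  -- line.ljust(44, '<') ported by hand (exact: pad on the right to length 44), then [:44]
  let l2 := PySem.List.slice (l1 ++ List.replicate (44 - l1.length) '<') none (some 44)
  String.mk ((PySem.List.enumerate l2 0).map (fun p => correct_mrz_character p.2 p.1 line_number))

-- ===== PORT B =====
-- str.maketrans table (all keys and values are single chars, so translate is a per-char map; exact)
def pvTable : PySem.Dict Char Char :=
  ⟨[(' ', '<'), ('?', '<'), ('_', '<'),
    ('O', '0'), ('Q', '0'), ('D', '0'),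
    ('I', '1'), ('L', '1'), ('|', '1'),
    ('Z', '2'), ('S', '5'), ('B', '8')]⟩

def pvField (seg : List Char) (fill : Char) (ok : Char → Bool) : List Char :=
  seg.map (fun c => if ok c then c else fill)

-- the _FIELDS dict: per line number, the contiguous (start, stop, fill, allowed) fields
def pvFieldsL1 : List (Int × Int × Char × (Char → Bool)) :=
  [(0, 2, 'P', fun c => (['P', '<'] : List Char).contains c),
   (2, 5, '<', fun c => PySem.Chars.isalpha c),
   (5, 44, '<', fun c => PySem.Chars.isalpha c || c == '<')]

def pvFieldsL2 : List (Int × Int × Char × (Char → Bool)) :=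
  [(0, 9, '<', fun c => PySem.Chars.isalnum c || c == '<'),
   (9, 10, '<', fun c => PySem.Chars.isdigit c || c == '<'),
   (10, 13, '<', fun c => PySem.Chars.isalnum c || c == '<'),
   (13, 19, '<', fun c => PySem.Chars.isdigit c),
   (19, 20, '<', fun c => PySem.Chars.isdigit c || c == '<'),
   (20, 21, '<', fun c => (['M', 'F', '<'] : List Char).contains c),
   (21, 27, '<', fun c => PySem.Chars.isdigit c),
   (27, 28, '<', fun c => PySem.Chars.isdigit c || c == '<'),
   (28, 44, '<', fun c => PySem.Chars.isalnum c || c == '<')]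

def pvFields : PySem.Dict Int (List (Int × Int × Char × (Char → Bool))) :=
  ⟨[(1, pvFieldsL1), (2, pvFieldsL2)]⟩

def clean_mrz_line_by_standard_alt (line : String) (line_number : Int) : String :=
  let s := (PySem.Chars.upper (PySem.Chars.strip line.toList)).map (fun c => pvTable.getD c c)
  let s := PySem.List.slice (s ++ List.replicate 44 '<') none (some 44)
  match pvFields.get? line_number with
  | none => String.mk s
  | some fs =>
    String.mk (fs.flatMap (fun f => pvField (PySem.List.slice s (some f.1) (some f.2.1)) f.2.2.1 f.2.2.2))

-- ===== PRECONDITION & SPEC =====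
def Spec_clean_mrz_line_by_standard (line : String) (line_number : Int) (out : String) : Prop := out = clean_mrz_line_by_standard_alt line line_number
instance (line : String) (line_number : Int) (out : String) : Decidable (Spec_clean_mrz_line_by_standard line line_number out) := by unfold Spec_clean_mrz_line_by_standard; infer_instance

-- ===== CLAIM (what is proved, stated in full; the proofs are below) =====
def Claim_equal_clean_mrz_line_by_standard : Prop := ∀ (line : String) (line_number : Int), Dom_clean_mrz_line_by_standard line line_number → Spec_clean_mrz_line_by_standard line line_number (clean_mrz_line_by_standard line line_number)

-- ===== LEMMAS AND PROOFS =====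

-- replacing a single character by a single character is a character map
theorem pv_go_single (a b : Char) (l : List Char) : ∀ (fuel : Nat) (acc : List Char), l.length ≤ fuel →
    PySem.Chars.replace.go [a] [b] fuel l acc = acc.reverse ++ l.map (fun c => if c = a then b else c) := by
  induction l with
  | nil => intro fuel acc h; cases fuel <;> simp [PySem.Chars.replace.go]
  | cons c t ih =>
    intro fuel acc h
    cases fuel with
    | zero => simp at h
    | succ f =>
      simp only [PySem.Chars.replace.go, List.isPrefixOf, Bool.and_true]
      by_cases hc : c = a
      · subst hc
        simp only [BEq.rfl, List.length_cons, List.length_nil, Nat.zero_add, List.drop_one,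
          List.tail_cons, List.map_cons]
        rw [ih f _ (by simpa using h)]
        simp
      · have : (a == c) = false := by simp; exact fun h' => hc h'.symm
        rw [this]
        simp only [Bool.false_eq_true, if_false, List.map_cons, if_neg hc]
        rw [ih f _ (by simpa using h)]
        simp

theorem pv_replace_single (cs : List Char) (a b : Char) :
    PySem.Chars.replace cs [a] [b] = cs.map (fun c => if c = a then b else c) := by
  have := pv_go_single a b cs cs.length [] le_rfl
  simp [PySem.Chars.replace] at this ⊢
  simpa using this

-- the three '<'-substitutions followed by the OCR-fix lookup agree with B's translate table, per character
theorem pv_char_fuse (c : Char) :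
    (PySem.Dict.getD ⟨[('O', '0'), ('Q', '0'), ('D', '0'), ('I', '1'), ('L', '1'), ('|', '1'),
        ('Z', '2'), ('S', '5'), ('B', '8')]⟩
      (if (if (if c = ' ' then '<' else c) = '?' then '<' else (if c = ' ' then '<' else c)) = '_'
        then '<' else (if (if c = ' ' then '<' else c) = '?' then '<' else (if c = ' ' then '<' else c)))
      (if (if (if c = ' ' then '<' else c) = '?' then '<' else (if c = ' ' then '<' else c)) = '_'
        then '<' else (if (if c = ' ' then '<' else c) = '?' then '<' else (if c = ' ' then '<' else c))))
    = pvTable.getD c c := by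
  by_cases hs : c = ' '
  · subst hs; rfl
  by_cases hq : c = '?'
  · subst hq; rfl
  by_cases hu : c = '_'
  · subst hu; rfl
  have e1 : (' ' == c) = false := by simp; exact fun h => hs h.symm
  have e2 : ('?' == c) = false := by simp; exact fun h => hq h.symm
  have e3 : ('_' == c) = false := by simp; exact fun h => hu h.symm
  simp only [pvTable, PySem.Dict.getD, PySem.Dict.get?, if_neg hs, if_neg hq, if_neg hu,
    List.find?, e1, e2, e3]

-- padding to at least 44 then truncating: the amount of padding beyond 44 is irrelevant
theorem pv_pad (l : List Char) :
    List.take 44 (l ++ List.replicate (44 - l.length) '<') = List.take 44 (l ++ List.replicate 44 '<') := by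
  rw [List.take_append, List.take_append, List.take_replicate, List.take_replicate]
  congr 2
  omega

-- one field: A's position cascade agrees with the field rule on every position of the field
theorem pv_seg (ln : Int) (fill : Char) (ok : Char → Bool) (off : Int) (seg : List Char)
    (h : ∀ (i : Nat), i < seg.length → ∀ c, correct_mrz_character c (off + i) ln = if ok c then c else fill) :
    (PySem.List.enumerate seg off).map (fun p => correct_mrz_character p.2 p.1 ln) = pvField seg fill ok := by
  apply List.ext_getElem
  · simp [PySem.List.length_enumerate, pvField]
  · intro i h1 h2
    simp only [List.getElem_map, PySem.List.getElem_enumerate, pvField]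
    exact h i (by simpa [PySem.List.length_enumerate] using h1) _

-- chaining contiguous chunks back together
theorem pv_chunk (a n : Nat) (t : List Char) :
    (t.drop a).take n ++ t.drop (a + n) = t.drop a := by
  have := List.take_append_drop n (t.drop a)
  rwa [List.drop_drop] at this

-- A's membership-based ifs vs B's contains-based ifs
theorem pv_rule_P (c : Char) :
    (if ¬(c ∈ (['P', '<'] : List Char)) then 'P' else c)
      = (if (['P', '<'] : List Char).contains c then c else 'P') := by
  by_cases h : c ∈ (['P', '<'] : List Char) <;> simp [h]

theorem pv_rule_MF (c : Char) :
    (if c ∈ (['M', 'F', '<'] : List Char) then c else '<')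
      = (if (['M', 'F', '<'] : List Char).contains c then c else '<') := by
  by_cases h : c ∈ (['M', 'F', '<'] : List Char) <;> simp [h]

-- line 1: the position cascade over a 44-char line is the concatenation of the three field cleanings
set_option maxHeartbeats 1000000 in
theorem pv_line1 (t : List Char) (ht : t.length = 44) :
    (PySem.List.enumerate t 0).map (fun p => correct_mrz_character p.2 p.1 1)
      = pvField (PySem.List.slice t (some 0) (some 2)) 'P' (fun c => (['P', '<'] : List Char).contains c)
        ++ (pvField (PySem.List.slice t (some 2) (some 5)) '<' (fun c => PySem.Chars.isalpha c)
        ++ pvField (PySem.List.slice t (some 5) (some 44)) '<' (fun c => PySem.Chars.isalpha c || c == '<')) := by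
  rw [PySem.List.slice_toNat t (by norm_num) (by norm_num),
      PySem.List.slice_toNat t (by norm_num) (by norm_num),
      PySem.List.slice_toNat t (by norm_num) (by norm_num)]
  simp only [Int.reduceToNat, Nat.reduceSub, List.drop_zero]
  have hsplit : t = t.take 2 ++ ((t.drop 2).take 3 ++ (t.drop 5).take 39) := by
    have c1 := pv_chunk 0 2 t
    have c2 := pv_chunk 2 3 t
    have c3 : (t.drop 5).take 39 = t.drop 5 := List.take_of_length_le (by simp [ht])
    simp only [List.drop_zero, Nat.reduceAdd] at c1 c2
    rw [c3, c2, c1]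
  conv_lhs => rw [hsplit]
  simp only [PySem.List.enumerate_append, List.map_append]
  have l1 : (t.take 2).length = 2 := by simp [ht]
  have l2 : ((t.drop 2).take 3).length = 3 := by simp [ht]
  rw [l1, l2]
  have hs1 : ∀ i : Nat, i < (t.take 2).length → ∀ c,
      correct_mrz_character c ((0 : Int) + i) 1
        = if (['P', '<'] : List Char).contains c then c else 'P' := by
    intro i hi c
    rw [l1] at hi
    interval_cases i <;> exact pv_rule_P c
  have hs2 : ∀ i : Nat, i < ((t.drop 2).take 3).length → ∀ c,
      correct_mrz_character c ((0 : Int) + ((2 : Nat) : Int) + i) 1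
        = if PySem.Chars.isalpha c then c else '<' := by
    intro i hi c
    rw [l2] at hi
    interval_cases i <;> rfl
  have hs3 : ∀ i : Nat, i < ((t.drop 5).take 39).length → ∀ c,
      correct_mrz_character c ((0 : Int) + ((2 : Nat) : Int) + ((3 : Nat) : Int) + i) 1
        = if PySem.Chars.isalpha c || c == '<' then c else '<' := by
    intro i hi c
    have hi' : i < 39 := by simp [ht] at hi; omega
    interval_cases i <;> rfl
  rw [pv_seg _ _ _ _ _ hs1, pv_seg _ _ _ _ _ hs2, pv_seg _ _ _ _ _ hs3]

-- line 2: same, for the nine fields of the second MRZ line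
set_option maxHeartbeats 4000000 in
theorem pv_line2 (t : List Char) (ht : t.length = 44) :
    (PySem.List.enumerate t 0).map (fun p => correct_mrz_character p.2 p.1 2)
      = pvField (PySem.List.slice t (some 0) (some 9)) '<' (fun c => PySem.Chars.isalnum c || c == '<')
        ++ (pvField (PySem.List.slice t (some 9) (some 10)) '<' (fun c => PySem.Chars.isdigit c || c == '<')
        ++ (pvField (PySem.List.slice t (some 10) (some 13)) '<' (fun c => PySem.Chars.isalnum c || c == '<')
        ++ (pvField (PySem.List.slice t (some 13) (some 19)) '<' (fun c => PySem.Chars.isdigit c)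
        ++ (pvField (PySem.List.slice t (some 19) (some 20)) '<' (fun c => PySem.Chars.isdigit c || c == '<')
        ++ (pvField (PySem.List.slice t (some 20) (some 21)) '<' (fun c => (['M', 'F', '<'] : List Char).contains c)
        ++ (pvField (PySem.List.slice t (some 21) (some 27)) '<' (fun c => PySem.Chars.isdigit c)
        ++ (pvField (PySem.List.slice t (some 27) (some 28)) '<' (fun c => PySem.Chars.isdigit c || c == '<')
        ++ (pvField (PySem.List.slice t (some 28) (some 44)) '<' (fun c => PySem.Chars.isalnum c || c == '<'))))))))) := by
  rw [PySem.List.slice_toNat t (by norm_num) (by norm_num),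
      PySem.List.slice_toNat t (by norm_num) (by norm_num),
      PySem.List.slice_toNat t (by norm_num) (by norm_num),
      PySem.List.slice_toNat t (by norm_num) (by norm_num),
      PySem.List.slice_toNat t (by norm_num) (by norm_num),
      PySem.List.slice_toNat t (by norm_num) (by norm_num),
      PySem.List.slice_toNat t (by norm_num) (by norm_num),
      PySem.List.slice_toNat t (by norm_num) (by norm_num),
      PySem.List.slice_toNat t (by norm_num) (by norm_num)]
  simp only [Int.reduceToNat, Nat.reduceSub, List.drop_zero]
  have hsplit : t = t.take 9 ++ ((t.drop 9).take 1 ++ ((t.drop 10).take 3 ++ ((t.drop 13).take 6 ++ ((t.drop 19).take 1 ++ ((t.drop 20).take 1 ++ ((t.drop 21).take 6 ++ ((t.drop 27).take 1 ++ ((t.drop 28).take 16)))))))) := by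
    have c1 := pv_chunk 0 9 t
    have c2 := pv_chunk 9 1 t
    have c3 := pv_chunk 10 3 t
    have c4 := pv_chunk 13 6 t
    have c5 := pv_chunk 19 1 t
    have c6 := pv_chunk 20 1 t
    have c7 := pv_chunk 21 6 t
    have c8 := pv_chunk 27 1 t
    have c9 : (t.drop 28).take 16 = t.drop 28 := List.take_of_length_le (by simp [ht])
    simp only [List.drop_zero, Nat.reduceAdd] at c1 c2 c3 c4 c5 c6 c7 c8
    rw [c9, c8, c7, c6, c5, c4, c3, c2, c1]
  conv_lhs => rw [hsplit]
  simp only [PySem.List.enumerate_append, List.map_append]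
  have l1 : (t.take 9).length = 9 := by simp [ht]
  have l2 : ((t.drop 9).take 1).length = 1 := by simp [ht]
  have l3 : ((t.drop 10).take 3).length = 3 := by simp [ht]
  have l4 : ((t.drop 13).take 6).length = 6 := by simp [ht]
  have l5 : ((t.drop 19).take 1).length = 1 := by simp [ht]
  have l6 : ((t.drop 20).take 1).length = 1 := by simp [ht]
  have l7 : ((t.drop 21).take 6).length = 6 := by simp [ht]
  have l8 : ((t.drop 27).take 1).length = 1 := by simp [ht]
  rw [l1, l2, l3, l4, l5, l6, l7, l8]
  have hs1 : ∀ i : Nat, i < (t.take 9).length → ∀ c,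
      correct_mrz_character c ((0 : Int) + i) 2
        = if (fun c => PySem.Chars.isalnum c || c == '<') c then c else '<' := by
    intro i hi c
    rw [l1] at hi
    interval_cases i <;> rfl
  have hs2 : ∀ i : Nat, i < ((t.drop 9).take 1).length → ∀ c,
      correct_mrz_character c ((0 : Int) + ((9 : Nat) : Int) + i) 2
        = if (fun c => PySem.Chars.isdigit c || c == '<') c then c else '<' := by
    intro i hi c
    rw [l2] at hi
    interval_cases i <;> rfl
  have hs3 : ∀ i : Nat, i < ((t.drop 10).take 3).length → ∀ c,
      correct_mrz_character c ((0 : Int) + ((9 : Nat) : Int) + ((1 : Nat) : Int) + i) 2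
        = if (fun c => PySem.Chars.isalnum c || c == '<') c then c else '<' := by
    intro i hi c
    rw [l3] at hi
    interval_cases i <;> rfl
  have hs4 : ∀ i : Nat, i < ((t.drop 13).take 6).length → ∀ c,
      correct_mrz_character c ((0 : Int) + ((9 : Nat) : Int) + ((1 : Nat) : Int) + ((3 : Nat) : Int) + i) 2
        = if (fun c => PySem.Chars.isdigit c) c then c else '<' := by
    intro i hi c
    rw [l4] at hi
    interval_cases i <;> rfl
  have hs5 : ∀ i : Nat, i < ((t.drop 19).take 1).length → ∀ c,
      correct_mrz_character c ((0 : Int) + ((9 : Nat) : Int) + ((1 : Nat) : Int) + ((3 : Nat) : Int) + ((6 : Nat) : Int) + i) 2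
        = if (fun c => PySem.Chars.isdigit c || c == '<') c then c else '<' := by
    intro i hi c
    rw [l5] at hi
    interval_cases i <;> rfl
  have hs6 : ∀ i : Nat, i < ((t.drop 20).take 1).length → ∀ c,
      correct_mrz_character c ((0 : Int) + ((9 : Nat) : Int) + ((1 : Nat) : Int) + ((3 : Nat) : Int) + ((6 : Nat) : Int) + ((1 : Nat) : Int) + i) 2
        = if (fun c => (['M', 'F', '<'] : List Char).contains c) c then c else '<' := by
    intro i hi c
    rw [l6] at hi
    interval_cases i <;> exact pv_rule_MF c
  have hs7 : ∀ i : Nat, i < ((t.drop 21).take 6).length → ∀ c,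
      correct_mrz_character c ((0 : Int) + ((9 : Nat) : Int) + ((1 : Nat) : Int) + ((3 : Nat) : Int) + ((6 : Nat) : Int) + ((1 : Nat) : Int) + ((1 : Nat) : Int) + i) 2
        = if (fun c => PySem.Chars.isdigit c) c then c else '<' := by
    intro i hi c
    rw [l7] at hi
    interval_cases i <;> rfl
  have hs8 : ∀ i : Nat, i < ((t.drop 27).take 1).length → ∀ c,
      correct_mrz_character c ((0 : Int) + ((9 : Nat) : Int) + ((1 : Nat) : Int) + ((3 : Nat) : Int) + ((6 : Nat) : Int) + ((1 : Nat) : Int) + ((1 : Nat) : Int) + ((6 : Nat) : Int) + i) 2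
        = if (fun c => PySem.Chars.isdigit c || c == '<') c then c else '<' := by
    intro i hi c
    rw [l8] at hi
    interval_cases i <;> rfl
  have hs9 : ∀ i : Nat, i < ((t.drop 28).take 16).length → ∀ c,
      correct_mrz_character c ((0 : Int) + ((9 : Nat) : Int) + ((1 : Nat) : Int) + ((3 : Nat) : Int) + ((6 : Nat) : Int) + ((1 : Nat) : Int) + ((1 : Nat) : Int) + ((6 : Nat) : Int) + ((1 : Nat) : Int) + i) 2
        = if (fun c => PySem.Chars.isalnum c || c == '<') c then c else '<' := by
    intro i hi c
    have hi' : i < 16 := by simp [ht] at hi; omega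
    interval_cases i <;> rfl
  rw [pv_seg _ _ _ _ _ hs1, pv_seg _ _ _ _ _ hs2, pv_seg _ _ _ _ _ hs3, pv_seg _ _ _ _ _ hs4, pv_seg _ _ _ _ _ hs5, pv_seg _ _ _ _ _ hs6, pv_seg _ _ _ _ _ hs7, pv_seg _ _ _ _ _ hs8, pv_seg _ _ _ _ _ hs9]

-- ===== VERDICT (by name: the statement is the Claim_ definition above) =====
set_option maxHeartbeats 1000000 in
theorem clean_mrz_line_by_standard_spec : Claim_equal_clean_mrz_line_by_standard := by
  intro line ln _
  unfold Spec_clean_mrz_line_by_standard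
  unfold clean_mrz_line_by_standard clean_mrz_line_by_standard_alt
  simp only [pv_replace_single, List.map_map, PySem.List.slice_to _ (by norm_num : (0:Int) ≤ 44), show Int.toNat 44 = 44 from rfl]
  have hfuse : (PySem.Chars.upper (PySem.Chars.strip line.toList)).map
      ((fun c => PySem.Dict.getD ⟨[('O', '0'), ('Q', '0'), ('D', '0'), ('I', '1'), ('L', '1'),
          ('|', '1'), ('Z', '2'), ('S', '5'), ('B', '8')]⟩ c c) ∘
        ((fun c => if c = '_' then '<' else c) ∘
          ((fun c => if c = '?' then '<' else c) ∘ (fun c => if c = ' ' then '<' else c))))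
      = (PySem.Chars.upper (PySem.Chars.strip line.toList)).map (fun c => pvTable.getD c c) := by
    exact List.map_congr_left (fun c _ => pv_char_fuse c)
  rw [hfuse, pv_pad]
  set t := List.take 44 ((PySem.Chars.upper (PySem.Chars.strip line.toList)).map
      (fun c => pvTable.getD c c) ++ List.replicate 44 '<') with htdef
  have ht : t.length = 44 := by rw [htdef]; simp
  by_cases h1 : ln = 1
  · subst h1
    have hg : pvFields.get? 1 = some pvFieldsL1 := rfl
    simp only [hg, List.flatMap_cons, List.flatMap_nil, List.append_nil, pvFieldsL1]
    refine congrArg String.mk ?_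
    rw [pv_line1 t ht]
  by_cases h2 : ln = 2
  · subst h2
    have hg : pvFields.get? 2 = some pvFieldsL2 := rfl
    simp only [hg, List.flatMap_cons, List.flatMap_nil, List.append_nil, pvFieldsL2]
    refine congrArg String.mk ?_
    rw [pv_line2 t ht]
  · have hg : pvFields.get? ln = none := by
      simp only [pvFields, PySem.Dict.get?, List.find?]
      have b1 : (((1:Int), pvFieldsL1).1 == ln) = false := by simp [Ne.symm h1]
      have b2 : (((2:Int), pvFieldsL2).1 == ln) = false := by simp [Ne.symm h2]
      rw [b1, b2]
      rfl
    simp only [hg]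
    refine congrArg String.mk ?_
    have b1 : (ln == 1) = false := by simp [h1]
    have b2 : (ln == 2) = false := by simp [h2]
    calc (PySem.List.enumerate t 0).map (fun p => correct_mrz_character p.2 p.1 ln)
        = (PySem.List.enumerate t 0).map (fun p => p.2) := by
          apply List.map_congr_left
          intro p _
          simp [correct_mrz_character, b1, b2]
      _ = t := PySem.List.map_snd_enumerate _ _
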